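-- pv_equiv track=rewrite | github.com/ashleymcm/AdventOfCode2017 | 24/24-2.py | get_longest_bridges
-- ===== SOURCE A (Python) =====
-- def get_longest_bridges(bridges):
--     longest_length = 0
--     long_bridges = []
--     for bridge in bridges:
--         if len(bridge) > longest_length:
--             longest_length = len(bridge)
--             long_bridges = [bridge]
--         elif len(bridge) == longest_length:
--             long_bridges.append(bridge)
--     return long_bridges
-- ===== SOURCE B (Python) =====
-- def get_longest_bridges(bridges):
--     m = max((len(b) for b in bridges), default=0)
--     return [b for b in bridges if len(b) == m]
-- ===== Notes on version B (the rewrite author's own statement) =====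
-- stated objective: simpler
-- what changed: Replaces A's single interleaved loop that maintains both the running maximum and the collected list (rebuilding/appending as it goes) with two separate passes: max(..., default=0) then a filtering comprehension.
import Mathlib
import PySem

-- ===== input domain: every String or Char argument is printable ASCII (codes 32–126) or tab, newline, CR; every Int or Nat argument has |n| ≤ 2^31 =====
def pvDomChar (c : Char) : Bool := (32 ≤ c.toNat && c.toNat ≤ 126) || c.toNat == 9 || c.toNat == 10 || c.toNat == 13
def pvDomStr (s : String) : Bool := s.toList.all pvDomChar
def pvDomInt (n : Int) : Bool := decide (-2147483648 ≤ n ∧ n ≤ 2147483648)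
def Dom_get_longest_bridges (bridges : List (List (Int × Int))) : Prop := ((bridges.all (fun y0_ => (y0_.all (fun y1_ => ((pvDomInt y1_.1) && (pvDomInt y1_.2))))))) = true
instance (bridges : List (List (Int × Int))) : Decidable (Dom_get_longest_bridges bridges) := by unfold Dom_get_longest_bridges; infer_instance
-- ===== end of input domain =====

-- B separates the computation: one pass for the maximum length (default 0), one filtering pass; simpler than A's interleaved loop. Return value proved equal on all inputs.

-- ===== PORT A =====
-- A: single loop keeping (longest_length, long_bridges), rebuilding the list on a strictly longer bridge, appending on a tie.
def pvStepA (st : Nat × List (List (Int × Int))) (b : List (Int × Int)) : Nat × List (List (Int × Int)) :=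
  if b.length > st.1 then (b.length, [b])
  else if b.length = st.1 then (st.1, st.2 ++ [b])
  else st

def get_longest_bridges (bridges : List (List (Int × Int))) : List (List (Int × Int)) :=
  (bridges.foldl pvStepA (0, [])).2

-- ===== PORT B =====
-- B: m = max of lengths (default 0), then filter by length = m.
def get_longest_bridges_alt (bridges : List (List (Int × Int))) : List (List (Int × Int)) :=
  let m := bridges.foldl (fun acc b => max acc b.length) 0
  bridges.filter (fun b => b.length == m)

-- ===== PRECONDITION & SPEC =====
def Spec_get_longest_bridges (bridges : List (List (Int × Int))) (out : List (List (Int × Int))) : Prop := out = get_longest_bridges_alt bridges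
instance (bridges : List (List (Int × Int))) (out : List (List (Int × Int))) : Decidable (Spec_get_longest_bridges bridges out) := by unfold Spec_get_longest_bridges; infer_instance

-- ===== CLAIM (what is proved, stated in full; the proofs are below) =====
def Claim_equal_get_longest_bridges : Prop := ∀ (bridges : List (List (Int × Int))), Dom_get_longest_bridges bridges → Spec_get_longest_bridges bridges (get_longest_bridges bridges)

-- ===== LEMMAS AND PROOFS =====

-- Invariant of A's fold from an arbitrary state (L, acc):
-- the final max is the fold of max over lengths starting at L, and the result list is
-- acc (kept exactly when the max never increased) followed by the bridges of maximal length.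
theorem foldmax_le (bs : List (List (Int × Int))) : ∀ (L : Nat), L ≤ bs.foldl (fun m b => max m b.length) L := by
  induction bs with
  | nil => simp
  | cons c cs ihc =>
    intro L
    simp only [List.foldl_cons]
    exact le_trans (Nat.le_max_left L c.length) (ihc (max L c.length))

theorem foldA_spec (bs : List (List (Int × Int))) : ∀ (L : Nat) (acc : List (List (Int × Int))),
    bs.foldl pvStepA (L, acc)
      = (bs.foldl (fun m b => max m b.length) L,
         (if bs.foldl (fun m b => max m b.length) L = L then acc else [])
           ++ bs.filter (fun b => b.length == bs.foldl (fun m b => max m b.length) L)) := by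
  induction bs with
  | nil => intro L acc; simp
  | cons b rest ih =>
    intro L acc
    have hmono := foldmax_le rest
    rcases lt_trichotomy b.length L with hlt | heq | hgt
    · -- len b < L : state unchanged, b filtered out
      have hstep : pvStepA (L, acc) b = (L, acc) := by
        simp [pvStepA, Nat.not_lt.mpr (le_of_lt hlt), Nat.ne_of_lt hlt]
      have hmax : max L b.length = L := Nat.max_eq_left (le_of_lt hlt)
      have hMge : L ≤ rest.foldl (fun m b => max m b.length) L := hmono L
      have hbne : (b.length == rest.foldl (fun m b => max m b.length) L) = false := by
        simp only [beq_eq_false_iff_ne, ne_eq]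
        omega
      simp only [List.foldl_cons, hstep, ih L acc, hmax, List.filter_cons, hbne]
      simp
    · -- len b = L : appended, max unchanged
      have hstep : pvStepA (L, acc) b = (L, acc ++ [b]) := by
        simp [pvStepA, heq]
      have hmax : max L b.length = L := by omega
      have hMge : L ≤ rest.foldl (fun m b => max m b.length) L := hmono L
      simp only [List.foldl_cons, hstep, ih L (acc ++ [b]), hmax, List.filter_cons]
      by_cases hML : rest.foldl (fun m b => max m b.length) L = L
      · have : (b.length == rest.foldl (fun m b => max m b.length) L) = true := by
          simp [hML, heq]
        simp [hML, heq]
      · have : (b.length == rest.foldl (fun m b => max m b.length) L) = false := by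
          simp only [beq_eq_false_iff_ne, ne_eq]
          omega
        simp [hML, this]
    · -- len b > L : list rebuilt from [b], max advances to len b
      have hstep : pvStepA (L, acc) b = (b.length, [b]) := by
        simp [pvStepA, hgt]
      have hmax : max L b.length = b.length := Nat.max_eq_right (le_of_lt hgt)
      have hMge : b.length ≤ rest.foldl (fun m b => max m b.length) b.length := hmono _
      have hMneL : rest.foldl (fun m b => max m b.length) b.length ≠ L := by omega
      simp only [List.foldl_cons, hstep, ih b.length [b], hmax, List.filter_cons]
      by_cases hMb : rest.foldl (fun m b => max m b.length) b.length = b.length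
      · have : (b.length == rest.foldl (fun m b => max m b.length) b.length) = true := by
          simp [hMb]
        simp only [hMb]
        simp
        omega
      · have hf : (b.length == rest.foldl (fun m b => max m b.length) b.length) = false := by
          simp only [beq_eq_false_iff_ne, ne_eq]
          omega
        simp [hMb, hMneL, hf]

-- ===== VERDICT (by name: the statement is the Claim_ definition above) =====
theorem get_longest_bridges_spec : Claim_equal_get_longest_bridges := by
  intro bridges _
  unfold Spec_get_longest_bridges get_longest_bridges get_longest_bridges_alt
  rw [foldA_spec bridges 0 []]
  simp
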